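-- pv_equiv track=rewrite | github.com/Uhphonsoo/FP-Project | part-2.py | are_ordenados
-- ===== SOURCE A (Python) =====
-- def transforma_tuplos_em_listas(tuplos):
--     lista_resultado = []
--     for tuplo in tuplos:
--         lista_resultado += [list(tuplo)]
--     return lista_resultado
--
-- def are_ordenados(tuplos):
--     length = len(tuplos)
--     tuplos_aux = transforma_tuplos_em_listas(tuplos)
--
--     for i in range(length-1):
--         x_anterior = tuplos_aux[i][0]
--         y_anterior = tuplos_aux[i][1]
--         x_seguinte = tuplos_aux[i+1][0]
--         y_seguinte = tuplos_aux[i+1][1]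
--         if y_anterior > y_seguinte:
--             return False
--         elif y_anterior == y_seguinte:
--             if x_anterior > x_seguinte:
--                 return False
--     return True
-- ===== SOURCE B (Python) =====
-- def are_ordenados(tuplos):
--     if len(tuplos) <= 1:
--         return True
--     keys = [(t[1], t[0]) for t in tuplos]
--     return keys == sorted(keys)
-- ===== Notes on version B (the rewrite author's own statement) =====
-- stated objective: idiomatic
-- what changed: Replaced the index-based adjacent-pair scan (after converting every tuple to a list) by building the (y,x) key list once and comparing it with its sorted copy.
import Mathlib
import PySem

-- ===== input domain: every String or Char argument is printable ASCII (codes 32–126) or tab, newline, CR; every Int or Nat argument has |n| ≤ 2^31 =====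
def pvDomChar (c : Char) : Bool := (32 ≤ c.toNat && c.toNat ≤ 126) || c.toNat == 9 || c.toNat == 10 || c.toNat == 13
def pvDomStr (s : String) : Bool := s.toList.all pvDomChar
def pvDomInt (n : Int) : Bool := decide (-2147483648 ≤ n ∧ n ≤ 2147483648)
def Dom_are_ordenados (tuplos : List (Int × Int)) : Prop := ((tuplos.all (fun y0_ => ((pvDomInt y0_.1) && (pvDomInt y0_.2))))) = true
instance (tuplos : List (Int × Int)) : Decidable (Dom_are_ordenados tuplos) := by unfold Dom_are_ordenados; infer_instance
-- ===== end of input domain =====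

-- B replaces A's index-based adjacent-pair scan by comparing the (y,x) key list with its sorted copy (idiomatic; not faster).

-- ===== PORT A =====
def transforma_tuplos_em_listas (tuplos : List (Int × Int)) : List (List Int) :=
  tuplos.foldl (fun lista_resultado tuplo => lista_resultado ++ [[tuplo.1, tuplo.2]]) []

-- the 'for i in range(length-1)' loop with its early 'return False's
def pvLoopA (tuplos_aux : List (List Int)) : List Int → Bool
  | [] => true
  | i :: rest =>
    let x_anterior := PySem.List.pyGetD (PySem.List.pyGetD tuplos_aux i []) 0 0
    let y_anterior := PySem.List.pyGetD (PySem.List.pyGetD tuplos_aux i []) 1 0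
    let x_seguinte := PySem.List.pyGetD (PySem.List.pyGetD tuplos_aux (i + 1) []) 0 0
    let y_seguinte := PySem.List.pyGetD (PySem.List.pyGetD tuplos_aux (i + 1) []) 1 0
    if y_anterior > y_seguinte then false
    else if y_anterior = y_seguinte then
      if x_anterior > x_seguinte then false else pvLoopA tuplos_aux rest
    else pvLoopA tuplos_aux rest

def are_ordenados (tuplos : List (Int × Int)) : Bool :=
  let length : Int := tuplos.length
  let tuplos_aux := transforma_tuplos_em_listas tuplos
  pvLoopA tuplos_aux (PySem.List.pyRange 0 (length - 1) 1)

-- ===== PORT B =====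
def are_ordenados_alt (tuplos : List (Int × Int)) : Bool :=
  if tuplos.length ≤ 1 then true
  else
    let keys := tuplos.map (fun t => (t.2, t.1))
    decide (keys = PySem.List.sorted2 keys Prod.fst Prod.snd)

-- ===== PRECONDITION & SPEC =====
def Spec_are_ordenados (tuplos : List (Int × Int)) (out : Bool) : Prop := out = are_ordenados_alt tuplos
instance (tuplos : List (Int × Int)) (out : Bool) : Decidable (Spec_are_ordenados tuplos out) := by unfold Spec_are_ordenados; infer_instance

-- ===== CLAIM (what is proved, stated in full; the proofs are below) =====
def Claim_equal_are_ordenados : Prop := ∀ (tuplos : List (Int × Int)), Dom_are_ordenados tuplos → Spec_are_ordenados tuplos (are_ordenados tuplos)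

-- ===== LEMMAS AND PROOFS =====

-- lexicographic ≤ on the (y,x) keys
abbrev pvLex (a b : Int × Int) : Prop := a.1 < b.1 ∨ (a.1 = b.1 ∧ a.2 ≤ b.2)

-- the strict comparison sorted2 uses on keys (k1 = fst, k2 = snd)
def pvB (a b : Int × Int) : Bool :=
  decide (a.1 < b.1) || (!decide (b.1 < a.1) && decide (a.2 < b.2))

theorem pvLex_trans {a b c : Int × Int} (h1 : pvLex a b) (h2 : pvLex b c) : pvLex a c := by
  unfold pvLex at *
  rcases h1 with h1 | ⟨h1, h1'⟩ <;> rcases h2 with h2 | ⟨h2, h2'⟩ <;> [left; left; left; right] <;> omega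

theorem pvLex_of_pvB {a b : Int × Int} (h : pvB a b = true) : pvLex a b := by
  unfold pvB at h; unfold pvLex
  simp only [Bool.or_eq_true, Bool.and_eq_true, Bool.not_eq_true', decide_eq_true_eq,
    decide_eq_false_iff_not] at h
  omega

theorem pvLex_of_not_pvB {a b : Int × Int} (h : pvB a b = false) : pvLex b a := by
  unfold pvB at h; unfold pvLex
  simp only [Bool.or_eq_false_iff, Bool.and_eq_false_iff, Bool.not_eq_false', decide_eq_true_eq,
    decide_eq_false_iff_not] at h
  omega

theorem pairwise_insertBy (x : Int × Int) (ys : List (Int × Int)) (h : ys.Pairwise pvLex) :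
    (PySem.List.insertBy pvB x ys).Pairwise pvLex := by
  induction ys with
  | nil => simp [PySem.List.insertBy]
  | cons y ys ih =>
    rw [List.pairwise_cons] at h
    by_cases hb : pvB x y = true
    · rw [PySem.List.insertBy, if_pos hb]
      refine List.Pairwise.cons ?_ (List.Pairwise.cons h.1 h.2)
      intro z hz
      rcases List.mem_cons.mp hz with rfl | hz
      · exact pvLex_of_pvB hb
      · exact pvLex_trans (pvLex_of_pvB hb) (h.1 z hz)
    · rw [PySem.List.insertBy, if_neg hb]
      refine List.Pairwise.cons ?_ (ih h.2)
      intro z hz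
      rcases (PySem.List.mem_insertBy pvB x z ys).mp hz with rfl | hz
      · exact pvLex_of_not_pvB (Bool.eq_false_iff.mpr hb)
      · exact h.1 z hz

theorem pairwise_foldl_insertBy (xs acc : List (Int × Int)) (h : acc.Pairwise pvLex) :
    (xs.foldl (fun acc x => PySem.List.insertBy pvB x acc) acc).Pairwise pvLex := by
  induction xs generalizing acc with
  | nil => exact h
  | cons x xs ih => exact ih _ (pairwise_insertBy x acc h)

theorem sorted2_key_eq (keys : List (Int × Int)) :
    PySem.List.sorted2 keys Prod.fst Prod.snd =
      keys.foldl (fun acc x => PySem.List.insertBy pvB x acc) [] := rfl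

theorem pairwise_sorted2 (keys : List (Int × Int)) :
    (PySem.List.sorted2 keys Prod.fst Prod.snd).Pairwise pvLex := by
  rw [sorted2_key_eq]
  exact pairwise_foldl_insertBy keys [] (List.Pairwise.nil)

theorem sorted2_eq_self_iff (keys : List (Int × Int)) :
    keys = PySem.List.sorted2 keys Prod.fst Prod.snd ↔ keys.Pairwise pvLex := by
  constructor
  · intro h; rw [h]; exact pairwise_sorted2 keys
  · intro h
    refine List.Perm.eq_of_pairwise ?_ h (pairwise_sorted2 keys)
      ((PySem.List.sorted2_perm keys Prod.fst Prod.snd false).symm)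
    intro a b _ _ hab hba
    unfold pvLex at hab hba
    exact Prod.ext (by omega) (by omega)

-- the adjacent relation A checks, expressed on the original tuples
abbrev pvAdj (t u : Int × Int) : Prop := pvLex (t.2, t.1) (u.2, u.1)

theorem pvLoopA_eq_all (aux : List (List Int)) (is : List Int) :
    pvLoopA aux is = is.all (fun i =>
      decide (pvLex
        (PySem.List.pyGetD (PySem.List.pyGetD aux i []) 1 0,
         PySem.List.pyGetD (PySem.List.pyGetD aux i []) 0 0)
        (PySem.List.pyGetD (PySem.List.pyGetD aux (i + 1) []) 1 0,
         PySem.List.pyGetD (PySem.List.pyGetD aux (i + 1) []) 0 0))) := by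
  induction is with
  | nil => rfl
  | cons i rest ih =>
    rw [pvLoopA, List.all_cons, ih]
    simp only [pvLex]
    split_ifs with h1 h2 h3 <;> simp_all <;> omega

theorem transforma_eq_map (tuplos : List (Int × Int)) :
    transforma_tuplos_em_listas tuplos = tuplos.map (fun t => [t.1, t.2]) := by
  unfold transforma_tuplos_em_listas
  simpa using PySem.List.foldl_append_singleton_eq_map (fun t : Int × Int => [t.1, t.2]) tuplos []

theorem pvGet (tuplos : List (Int × Int)) (n : Nat) (h : n < tuplos.length) :
    PySem.List.pyGetD (tuplos.map (fun t => [t.1, t.2])) (n : Int) [] =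
      [tuplos[n].1, tuplos[n].2] := by
  rw [PySem.List.pyGetD_natCast, List.getD_eq_getElem _ _ (by simpa using h)]
  simp

theorem are_ordenados_eq_isChain (tuplos : List (Int × Int)) :
    are_ordenados tuplos = decide (List.IsChain pvAdj tuplos) := by
  unfold are_ordenados
  rw [transforma_eq_map, pvLoopA_eq_all, Bool.eq_iff_iff, decide_eq_true_eq,
      List.isChain_iff_getElem, List.all_eq_true]
  constructor
  · intro hall i hi
    have hmem : (i : Int) ∈ PySem.List.pyRange 0 ((tuplos.length : Int) - 1) 1 := by
      rw [PySem.List.mem_pyRange_one]; omega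
    have hcast : ((i : Int) + 1) = ((i + 1 : Nat) : Int) := by push_cast; ring
    have := hall _ hmem
    rw [decide_eq_true_eq, pvGet _ i (by omega), hcast, pvGet _ (i + 1) (by omega)] at this
    simpa [pvAdj, PySem.List.pyGetD] using this
  · intro h i hmem
    rw [PySem.List.mem_pyRange_one] at hmem
    obtain ⟨n, rfl⟩ := Int.eq_ofNat_of_zero_le hmem.1
    have hlt : n + 1 < tuplos.length := by omega
    have hcast : ((n : Int) + 1) = ((n + 1 : Nat) : Int) := by push_cast; ring
    rw [decide_eq_true_eq, pvGet _ n (by omega), hcast, pvGet _ (n + 1) (by omega)]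
    simpa [pvAdj, PySem.List.pyGetD] using h n hlt

theorem are_ordenados_alt_eq_isChain (tuplos : List (Int × Int)) :
    are_ordenados_alt tuplos = decide (List.IsChain pvAdj tuplos) := by
  unfold are_ordenados_alt
  have hP : List.IsChain pvAdj tuplos ↔ tuplos.Pairwise pvAdj :=
    @List.isChain_iff_pairwise _ _ _ ⟨fun h1 h2 => pvLex_trans h1 h2⟩
  by_cases hlen : tuplos.length ≤ 1
  · rw [if_pos hlen]
    rcases tuplos with _ | ⟨t, _ | ⟨u, rest⟩⟩
    · simp
    · simp [List.IsChain.singleton]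
    · simp at hlen
  · rw [if_neg hlen]
    have : (tuplos.map (fun t => (t.2, t.1))).Pairwise pvLex ↔ tuplos.Pairwise pvAdj := by
      rw [List.pairwise_map]
    rw [Bool.eq_iff_iff]
    rw [decide_eq_true_eq, decide_eq_true_eq, sorted2_eq_self_iff, this, hP]

-- ===== VERDICT (by name: the statement is the Claim_ definition above) =====
theorem are_ordenados_spec : Claim_equal_are_ordenados := by
  intro tuplos _
  unfold Spec_are_ordenados
  rw [are_ordenados_eq_isChain, are_ordenados_alt_eq_isChain]
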